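-- pv_equiv track=rewrite | github.com/sguillot/NICER-Pointing | src/function.py | unique_dict
-- ===== SOURCE A (Python) =====
-- from typing import Dict, Tuple, Union, List
--
-- def unique_dict(name_list: List) -> Dict:
--     """
--     Create a dictionary that associates names with their indices in a list.
--
--     Args:
--         name_list (List): A list of names.
--
--     Returns:
--         Dict: A dictionary where keys are names and values are lists of corresponding indices.
--     """
--     index_dict = {}
--     duplicate_dict = {}
--
--     for index, item in enumerate(name_list):
--         if item in index_dict:
--             if item in duplicate_dict:
--                 duplicate_dict[item].append(index)
--             else:
--                 duplicate_dict[item] = [index_dict[item], index]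
--         else:
--             index_dict[item] = index
--     return duplicate_dict
-- ===== SOURCE B (Python) =====
-- def unique_dict(name_list):
--     """Group every index by name in one pass, then keep only names whose
--     index list has length > 1, emitting each at its second occurrence so
--     the result dict is built in duplicate-discovery order."""
--     groups = {}
--     for index, item in enumerate(name_list):
--         groups.setdefault(item, []).append(index)
--     return {item: groups[item]
--             for index, item in enumerate(name_list)
--             if len(groups[item]) > 1 and groups[item][1] == index}
-- ===== Notes on version B (the rewrite author's own statement) =====
-- stated objective: alternative
-- what changed: Replaces A's single pass with its two-dict first/second-occurrence bookkeeping by a group-then-filter decomposition: one pass collects every index per name with setdefault(...).append, then a dict comprehension keeps names with more than one index, emitting each at its second occurrence so even dict insertion order matches A exactly.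
import Mathlib
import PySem

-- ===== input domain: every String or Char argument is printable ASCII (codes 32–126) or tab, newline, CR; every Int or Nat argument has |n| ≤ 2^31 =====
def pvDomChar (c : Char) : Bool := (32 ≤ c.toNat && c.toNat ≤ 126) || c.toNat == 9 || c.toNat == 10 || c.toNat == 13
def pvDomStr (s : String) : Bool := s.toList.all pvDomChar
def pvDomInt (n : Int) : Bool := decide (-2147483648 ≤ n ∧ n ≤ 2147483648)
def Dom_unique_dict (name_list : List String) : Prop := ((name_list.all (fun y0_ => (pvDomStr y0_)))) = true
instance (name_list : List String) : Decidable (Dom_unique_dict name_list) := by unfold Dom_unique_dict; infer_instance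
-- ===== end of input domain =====

-- B replaces A's two-dict first/second-occurrence bookkeeping by a group-then-filter
-- decomposition: one pass grouping every index by name, then a comprehension keeping
-- names with more than one index, emitted at their second occurrence (alternative; same cost).


-- ===== PORT A =====
-- literal transliteration of A: one pass keeping index_dict (first index of each seen
-- name) and duplicate_dict (created at the second occurrence, appended to afterwards);
-- the returned dict becomes its items list. 'index_dict[item]' and
-- 'duplicate_dict[item].append(...)' are ported with getD/insert; both keys are
-- guaranteed present by the guarding 'in' tests, so no KeyError is reachable.
def unique_dict (name_list : List String) : List (String × List Int) :=
  let st := (PySem.List.enumerate name_list 0).foldl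
    (fun (st : PySem.Dict String Int × PySem.Dict String (List Int)) p =>
      let index_dict := st.1
      let duplicate_dict := st.2
      if index_dict.contains p.2 then
        if duplicate_dict.contains p.2 then
          (index_dict, duplicate_dict.insert p.2 (duplicate_dict.getD p.2 [] ++ [p.1]))
        else
          (index_dict, duplicate_dict.insert p.2 [index_dict.getD p.2 0, p.1])
      else (index_dict.insert p.2 p.1, duplicate_dict))
    (PySem.Dict.empty, PySem.Dict.empty)
  st.2.items

-- ===== PORT B =====
-- literal transliteration of B: phase 1 groups all indices per name
-- (setdefault(item, []).append(index) = modify with default []); phase 2 is the dict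
-- comprehension keeping names whose group has >1 index, at their second occurrence.
-- 'groups[item]' is ported with getD []; the key is always present.
def unique_dict_alt (name_list : List String) : List (String × List Int) :=
  let groups := (PySem.List.enumerate name_list 0).foldl
    (fun d p => d.modify p.2 [] (· ++ [p.1])) PySem.Dict.empty
  let res := (PySem.List.enumerate name_list 0).foldl
    (fun (d : PySem.Dict String (List Int)) p =>
      if PySem.List.len (groups.getD p.2 []) > 1 ∧ PySem.List.pyGetD (groups.getD p.2 []) 1 0 = p.1
      then d.insert p.2 (groups.getD p.2 []) else d)
    PySem.Dict.empty
  res.items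

-- ===== PRECONDITION & SPEC =====
def Spec_unique_dict (name_list : List String) (out : List (String × List Int)) : Prop := out = unique_dict_alt name_list
instance (name_list : List String) (out : List (String × List Int)) : Decidable (Spec_unique_dict name_list out) := by unfold Spec_unique_dict; infer_instance

-- ===== CLAIM (what is proved, stated in full; the proofs are below) =====
def Claim_equal_unique_dict : Prop := ∀ (name_list : List String), Dom_unique_dict name_list → Spec_unique_dict name_list (unique_dict name_list)

-- ===== LEMMAS AND PROOFS =====
def idxs (l : List String) (n : String) : List Int :=
  ((PySem.List.enumerate l 0).filter (fun p => p.2 == n)).map (·.1)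

theorem idxs_snoc (l : List String) (x n : String) :
    idxs (l ++ [x]) n = idxs l n ++ (if x == n then [(l.length : Int)] else []) := by
  simp only [idxs, PySem.List.enumerate_append, List.filter_append, List.map_append]
  congr 1
  simp [PySem.List.enumerate]
  split <;> simp_all

theorem length_idxs (l : List String) (n : String) :
    (idxs l n).length = l.count n := by
  induction l using List.reverseRecOn with
  | nil => simp [idxs, PySem.List.enumerate_nil]
  | append_singleton l x ih =>
    rw [idxs_snoc]
    simp [List.count_append, ih]
    split <;> simp_all [eq_comm]

theorem mem_idxs_bound (l : List String) (n : String) :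
    ∀ i ∈ idxs l n, 0 ≤ i ∧ i < (l.length : Int) := by
  induction l using List.reverseRecOn with
  | nil => simp [idxs, PySem.List.enumerate_nil]
  | append_singleton l x ih =>
    intro i hi
    rw [idxs_snoc] at hi
    simp only [List.mem_append] at hi
    rcases hi with h | h
    · have := ih i h
      refine ⟨this.1, ?_⟩
      have := this.2
      simp only [List.length_append, List.length_cons, List.length_nil]
      push_cast
      omega
    · split at h
      · simp only [List.mem_singleton] at h
        subst h
        simp only [List.length_append, List.length_cons, List.length_nil]
        push_cast
        constructor <;> omega
      · simp at h

def cnd (l : List String) (p : Int × String) : Bool :=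
  decide (PySem.List.len (idxs l p.2) > 1 ∧ PySem.List.pyGetD (idxs l p.2) 1 0 = p.1)

def secondsOf (l : List String) : List String :=
  ((PySem.List.enumerate l 0).filter (cnd l)).map (·.2)

theorem mem_secondsOf (l : List String) (n : String) (h : n ∈ secondsOf l) :
    2 ≤ l.count n := by
  simp only [secondsOf, List.mem_map, List.mem_filter] at h
  obtain ⟨p, ⟨_, hc⟩, rfl⟩ := h
  simp only [cnd, decide_eq_true_eq, PySem.List.len_eq] at hc
  have := hc.1
  rw [length_idxs] at this
  omega

theorem pyGetD_one (xs : List Int) (d : Int) (h : 1 < xs.length) :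
    PySem.List.pyGetD xs 1 d = xs[1] := by
  have h2 := PySem.List.pyGetD_ofNat' (xs:=xs) (k:=1) (d:=d)
  simp at h2
  rw [h2]
  simp [List.getElem?_eq_getElem h]

theorem cnd_snoc_mem (l : List String) (x : String) (p : Int × String)
    (hp : p ∈ PySem.List.enumerate l 0) : cnd (l ++ [x]) p = cnd l p := by
  by_cases hx : x = p.2
  · -- x occurs again: idxs gains a final element ↑l.length
    have hmem : p.2 ∈ l := by
      rw [PySem.List.mem_enumerate_iff] at hp
      obtain ⟨k, hk, rfl⟩ := hp
      exact List.getElem_mem hk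
    have hp1 : p.1 < (l.length : Int) := by
      rw [PySem.List.mem_enumerate_iff] at hp
      obtain ⟨k, hk, rfl⟩ := hp
      simp
      omega
    have hL : 1 ≤ (idxs l p.2).length := by
      rw [length_idxs]
      exact List.count_pos_iff.mpr hmem
    simp only [cnd, PySem.List.len_eq]
    rw [idxs_snoc]
    simp only [hx, beq_self_eq_true, if_true]
    by_cases h1 : 1 < (idxs l p.2).length
    · have h2 : 1 < ((idxs l p.2) ++ [(l.length : Int)]).length := by
        simp; omega
      rw [pyGetD_one _ _ h2, pyGetD_one _ _ h1, List.getElem_append_left h1]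
      simp only [List.length_append, List.length_cons, List.length_nil]
      rw [decide_eq_decide]
      constructor <;> rintro ⟨-, h⟩
      · exact ⟨by push_cast; omega, h⟩
      · exact ⟨by push_cast; omega, h⟩
    · have hL1 : (idxs l p.2).length = 1 := by omega
      have h2 : 1 < ((idxs l p.2) ++ [(l.length : Int)]).length := by simp; omega
      rw [pyGetD_one _ _ h2]
      have : ((idxs l p.2) ++ [(l.length : Int)])[1] = (l.length : Int) := by
        rw [List.getElem_append_right (by omega)]
        simp [hL1]
      rw [this]
      simp only [List.length_append, List.length_cons, List.length_nil]
      rw [decide_eq_false, decide_eq_false]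
      · rintro ⟨hgt, -⟩
        omega
      · rintro ⟨-, heq⟩
        omega
  · simp [cnd, idxs_snoc, beq_iff_eq, hx]

theorem cnd_snoc_new (l : List String) (x : String) :
    cnd (l ++ [x]) ((l.length : Int), x) = decide (l.count x = 1) := by
  have hlen : (idxs l x).length = l.count x := length_idxs l x
  simp only [cnd, PySem.List.len_eq]
  rw [idxs_snoc]
  simp only [beq_self_eq_true, if_true]
  rcases Nat.lt_or_ge (l.count x) 2 with hc | hc
  · rcases Nat.lt_or_ge (l.count x) 1 with hc0 | hc1
    · have h0 : idxs l x = [] := by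
        rw [← List.length_eq_zero_iff]; omega
      rw [h0]
      simp
      omega
    · have h1 : (idxs l x).length = 1 := by omega
      have h2 : 1 < ((idxs l x) ++ [(l.length : Int)]).length := by simp; omega
      rw [pyGetD_one _ _ h2, List.getElem_append_right (by omega)]
      simp [h1]
      omega
  · have h1 : 1 < (idxs l x).length := by omega
    have h2 : 1 < ((idxs l x) ++ [(l.length : Int)]).length := by simp; omega
    rw [pyGetD_one _ _ h2, List.getElem_append_left h1]
    have hb := (mem_idxs_bound l x _ (List.getElem_mem h1)).2
    rw [decide_eq_false (by rintro ⟨-, h⟩; omega), decide_eq_false (by omega)]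

theorem secondsOf_snoc (l : List String) (x : String) :
    secondsOf (l ++ [x]) = secondsOf l ++ (if l.count x = 1 then [x] else []) := by
  simp only [secondsOf, PySem.List.enumerate_append, List.filter_append, List.map_append]
  congr 1
  · rw [List.filter_congr (fun p hp => cnd_snoc_mem l x p hp)]
  · have he : PySem.List.enumerate [x] ((0 : Int) + l.length) = [((l.length : Int), x)] := by
      simp [PySem.List.enumerate_cons, PySem.List.enumerate_nil]
    rw [he]
    simp only [List.filter_cons, List.filter_nil, cnd_snoc_new]
    split
    · simp_all
    · simp_all

theorem nodup_secondsOf (l : List String) : (secondsOf l).Nodup := by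
  induction l using List.reverseRecOn with
  | nil => simp [secondsOf, PySem.List.enumerate_nil]
  | append_singleton l x ih =>
    rw [secondsOf_snoc]
    split
    · refine List.Nodup.append ih (List.nodup_singleton x) ?_
      intro a ha hb
      simp at hb
      subst hb
      have := mem_secondsOf l a ha
      omega
    · simpa using ih

def refD (l : List String) : List (String × List Int) :=
  (secondsOf l).map (fun n => (n, idxs l n))


theorem groups_getD (l : List String) (n : String) :
    (((PySem.List.enumerate l 0).foldl
      (fun d p => d.modify p.2 [] (· ++ [p.1])) PySem.Dict.empty)).getD n [] = idxs l n := by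
  have hswap : ((PySem.List.enumerate l 0).map Prod.swap).foldl
      (fun (d : PySem.Dict String (List Int)) q => d.modify q.1 [] (· ++ [q.2])) PySem.Dict.empty
      = (PySem.List.enumerate l 0).foldl
      (fun d p => d.modify p.2 [] (· ++ [p.1])) PySem.Dict.empty := by
    rw [List.foldl_map]
    rfl
  rw [← hswap, PySem.Dict.getD_foldl_modify_append]
  simp [idxs, List.filter_map, Function.comp_def, PySem.Dict.getD_empty]

theorem altB_eq_refD (l : List String) : unique_dict_alt l = refD l := by
  have hstep : unique_dict_alt l =
      (((PySem.List.enumerate l 0).filter (cnd l)).foldl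
        (fun (d : PySem.Dict String (List Int)) p => d.insert p.2 (idxs l p.2))
        PySem.Dict.empty).items := by
    unfold unique_dict_alt
    simp only [groups_getD]
    rw [List.foldl_filter]
    congr 2
    funext d p
    simp [cnd]
  rw [hstep,
    PySem.Dict.items_foldl_insert_fresh _ _ _ _ (fun a _ => PySem.Dict.contains_empty _)
      (by simpa [secondsOf] using nodup_secondsOf l)]
  simp [refD, secondsOf, List.map_map, Function.comp_def, PySem.Dict.empty]

theorem mem_secondsOf_iff (l : List String) (n : String) :
    n ∈ secondsOf l ↔ 2 ≤ l.count n := by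
  induction l using List.reverseRecOn with
  | nil => simp [secondsOf, PySem.List.enumerate_nil]
  | append_singleton l x ih =>
    rw [secondsOf_snoc]
    by_cases hx : n = x
    · subst hx
      by_cases h1 : l.count n = 1
      · simp [ih, h1]
      · simp only [List.mem_append, ih, h1, if_false, List.count_append,
          List.count_singleton, beq_self_eq_true, if_true, List.not_mem_nil, or_false]
        omega
    · have hxn : ¬ x = n := fun h => hx h.symm
      simp [ih, hx, hxn, List.count_append]

def stepA (st : PySem.Dict String Int × PySem.Dict String (List Int)) (p : Int × String) :
    PySem.Dict String Int × PySem.Dict String (List Int) :=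
  let index_dict := st.1
  let duplicate_dict := st.2
  if index_dict.contains p.2 then
    if duplicate_dict.contains p.2 then
      (index_dict, duplicate_dict.insert p.2 (duplicate_dict.getD p.2 [] ++ [p.1]))
    else
      (index_dict, duplicate_dict.insert p.2 [index_dict.getD p.2 0, p.1])
  else (index_dict.insert p.2 p.1, duplicate_dict)

theorem stateA_inv (l : List String) :
    (∀ n, ((PySem.List.enumerate l 0).foldl stepA (PySem.Dict.empty, PySem.Dict.empty)).1.contains n
        = decide (n ∈ l)) ∧
    (∀ n, ((PySem.List.enumerate l 0).foldl stepA (PySem.Dict.empty, PySem.Dict.empty)).1.getD n 0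
        = (idxs l n).headD 0) ∧
    ((PySem.List.enumerate l 0).foldl stepA (PySem.Dict.empty, PySem.Dict.empty)).2.items = refD l := by
  induction l using List.reverseRecOn with
  | nil =>
    refine ⟨fun n => ?_, fun n => ?_, ?_⟩
    · simp [PySem.List.enumerate_nil, PySem.Dict.contains_empty]
    · simp [PySem.List.enumerate_nil, PySem.Dict.getD_empty, idxs]
    · simp [PySem.List.enumerate_nil, refD, secondsOf, PySem.Dict.empty]
  | append_singleton l x ih =>
    obtain ⟨ih1, ih2, ih3⟩ := ih
    have hfold : (PySem.List.enumerate (l ++ [x]) 0).foldl stepA (PySem.Dict.empty, PySem.Dict.empty)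
        = stepA ((PySem.List.enumerate l 0).foldl stepA (PySem.Dict.empty, PySem.Dict.empty))
            ((l.length : Int), x) := by
      rw [PySem.List.enumerate_append]
      have he : PySem.List.enumerate [x] ((0 : Int) + l.length) = [((l.length : Int), x)] := by
        simp [PySem.List.enumerate_cons, PySem.List.enumerate_nil]
      rw [he, List.foldl_append]
      rfl
    set st := (PySem.List.enumerate l 0).foldl stepA (PySem.Dict.empty, PySem.Dict.empty) with hst
    -- keys of the duplicate dict
    have hkeys : st.2.keys = secondsOf l := by
      simp only [PySem.Dict.keys, ih3, refD, List.map_map]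
      simp [Function.comp_def]
    have hnodupk : st.2.keys.Nodup := by rw [hkeys]; exact nodup_secondsOf l
    have hcont2 : ∀ n, st.2.contains n = decide (n ∈ secondsOf l) := by
      intro n
      rw [PySem.Dict.contains_eq_decide_mem_keys, hkeys]
    have hgetD2 : x ∈ secondsOf l → st.2.getD x [] = idxs l x := by
      intro hx
      exact PySem.Dict.getD_of_mem_items _
        (by rw [ih3]; exact List.mem_map_of_mem hx) hnodupk _
    by_cases hmem : x ∈ l
    · have hc1 : st.1.contains x = true := by rw [ih1]; simpa using hmem
      by_cases h2 : 2 ≤ l.count x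
      · -- x already a duplicate: append to its entry
        have hc2 : st.2.contains x = true := by
          rw [hcont2]; simpa using (mem_secondsOf_iff l x).mpr h2
        have hne1 : l.count x ≠ 1 := by omega
        refine ⟨fun n => ?_, fun n => ?_, ?_⟩ <;>
          rw [hfold] <;> simp only [stepA, hc1, hc2, if_true]
        · rw [ih1, decide_eq_decide]
          simp only [List.mem_append, List.mem_singleton]
          exact ⟨Or.inl, fun h => h.elim id (fun h => h ▸ hmem)⟩
        · rw [ih2, idxs_snoc]
          by_cases hx : x = n
          · subst hx
            have : idxs l x ≠ [] := by
              intro h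
              have := length_idxs l x
              rw [h] at this
              simp at this
              omega
            simp only [beq_self_eq_true, if_true]
            obtain ⟨a, as, ha⟩ := List.exists_cons_of_ne_nil this
            rw [ha]
            simp
          · simp [hx]
        · rw [PySem.Dict.items_insert_of_contains _ _ hc2, ih3,
            hgetD2 ((mem_secondsOf_iff l x).mpr h2), refD, refD, secondsOf_snoc,
            if_neg hne1, List.append_nil, List.map_map]
          refine List.map_congr_left (fun n hn => ?_)
          simp only [Function.comp_def]
          by_cases hx : n = x
          · subst hx
            simp [idxs_snoc]
          · simp [idxs_snoc, hx, Ne.symm hx]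
      · -- second occurrence: create the entry
        have hcc : l.count x = 1 := by
          have := List.count_pos_iff.mpr hmem
          omega
        have hc2 : st.2.contains x = false := by
          rw [hcont2]
          simp [mem_secondsOf_iff, hcc]
        have hlen1 : (idxs l x).length = 1 := by rw [length_idxs, hcc]
        obtain ⟨a, ha⟩ := List.length_eq_one_iff.mp hlen1
        refine ⟨fun n => ?_, fun n => ?_, ?_⟩ <;>
          rw [hfold] <;>
          simp only [stepA, hc1, hc2, if_true, Bool.false_eq_true, if_false]
        · rw [ih1, decide_eq_decide]
          simp only [List.mem_append, List.mem_singleton]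
          exact ⟨Or.inl, fun h => h.elim id (fun h => h ▸ hmem)⟩
        · rw [ih2, idxs_snoc]
          by_cases hx : x = n
          · subst hx
            rw [ha]
            simp
          · simp [hx]
        · rw [PySem.Dict.items_insert_of_not_contains _ _ hc2, ih3, ih2,
            refD, refD, secondsOf_snoc, if_pos hcc, List.map_append]
          congr 1
          · refine List.map_congr_left (fun n hn => ?_)
            have hne : n ≠ x := by
              intro h
              have := (mem_secondsOf_iff l n).mp hn
              rw [h, hcc] at this
              omega
            simp [idxs_snoc, hne, Ne.symm hne]
          · rw [ha]
            simp [idxs_snoc, ha]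
    · -- first occurrence of x
      have hc1 : st.1.contains x = false := by rw [ih1]; simpa using hmem
      have hcc : l.count x = 0 := List.count_eq_zero.mpr hmem
      have hnil : idxs l x = [] := by
        have := length_idxs l x
        rw [hcc] at this
        exact List.length_eq_zero_iff.mp this
      refine ⟨fun n => ?_, fun n => ?_, ?_⟩ <;>
        rw [hfold] <;> simp only [stepA, hc1, Bool.false_eq_true, if_false]
      · rw [PySem.Dict.contains_insert, ih1]
        by_cases hx : n = x
        · subst hx
          simp
        · simp [hx, List.mem_append, Ne.symm hx]
      · rw [PySem.Dict.getD_insert, ih2, idxs_snoc]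
        by_cases hx : n = x
        · subst hx
          rw [hnil]
          simp
        · simp [hx, Ne.symm hx]
      · rw [ih3, refD, refD, secondsOf_snoc, if_neg (by omega : ¬ l.count x = 1),
          List.append_nil]
        refine List.map_congr_left (fun n hn => ?_)
        have hne : n ≠ x := by
          intro h
          have := (mem_secondsOf_iff l n).mp hn
          subst h
          omega
        simp [idxs_snoc, hne, Ne.symm hne]


theorem a_eq_refD (l : List String) : unique_dict l = refD l := by
  have h := (stateA_inv l).2.2
  unfold unique_dict
  exact h


-- ===== VERDICT (by name: the statement is the Claim_ definition above) =====
theorem unique_dict_spec : Claim_equal_unique_dict := by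
  intro l _
  unfold Spec_unique_dict
  rw [a_eq_refD, altB_eq_refD]
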